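-- pv_equiv track=rewrite | github.com/axelarge/advent-of-code | src/advent_of_code/y2021/day22.py | solve
-- ===== SOURCE A (Python) =====
-- def solve(steps):
--     prev = []
--     for step in steps:
--         on, x1, x2, y1, y2, z1, z2 = step
--         bonus = []
--         for oon, ox1, ox2, oy1, oy2, oz1, oz2 in prev:
--             if x1 <= ox2 and x2 >= ox1 and y1 <= oy2 and y2 >= oy1 and z1 <= oz2 and z2 >= oz1:
--                 bonus.append((not oon, max(x1, ox1), min(x2, ox2), max(y1, oy1), min(y2, oy2), max(z1, oz1), min(z2, oz2)))
--         prev.extend(bonus)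
--         if on:
--             prev.append(step)
--
--     tot = 0
--     for on, x1, x2, y1, y2, z1, z2 in prev:
--         tot += (1 if on else -1) * (x2 - x1 + 1) * (y2 - y1 + 1) * (z2 - z1 + 1)
--     return tot
-- ===== SOURCE B (Python) =====
-- def solve(steps):
--     def uncovered(c, later):
--         x1, x2, y1, y2, z1, z2 = c
--         if not later:
--             return (x2 - x1 + 1) * (y2 - y1 + 1) * (z2 - z1 + 1)
--         (_, ox1, ox2, oy1, oy2, oz1, oz2) = later[0]
--         rest = later[1:]
--         total = uncovered(c, rest)
--         if x1 <= ox2 and x2 >= ox1 and y1 <= oy2 and y2 >= oy1 and z1 <= oz2 and z2 >= oz1: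
--             total -= uncovered((max(x1, ox1), min(x2, ox2), max(y1, oy1), min(y2, oy2),
--                                 max(z1, oz1), min(z2, oz2)), rest)
--         return total
--
--     tot = 0
--     for i, (on, x1, x2, y1, y2, z1, z2) in enumerate(steps):
--         if on:
--             tot += uncovered((x1, x2, y1, y2, z1, z2), steps[i + 1:])
--     return tot
-- ===== Notes on version B (the rewrite author's own statement) =====
-- stated objective: alternative
-- what changed: B drops A's iteratively grown list of signed intersection cuboids entirely: it recursively computes, for each 'on' step, the signed volume of its cuboid not covered by any later step (uncovered(c, later) = vol(c) minus uncovered(c∩later[0], rest) when they overlap), and sums those.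
import Mathlib
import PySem

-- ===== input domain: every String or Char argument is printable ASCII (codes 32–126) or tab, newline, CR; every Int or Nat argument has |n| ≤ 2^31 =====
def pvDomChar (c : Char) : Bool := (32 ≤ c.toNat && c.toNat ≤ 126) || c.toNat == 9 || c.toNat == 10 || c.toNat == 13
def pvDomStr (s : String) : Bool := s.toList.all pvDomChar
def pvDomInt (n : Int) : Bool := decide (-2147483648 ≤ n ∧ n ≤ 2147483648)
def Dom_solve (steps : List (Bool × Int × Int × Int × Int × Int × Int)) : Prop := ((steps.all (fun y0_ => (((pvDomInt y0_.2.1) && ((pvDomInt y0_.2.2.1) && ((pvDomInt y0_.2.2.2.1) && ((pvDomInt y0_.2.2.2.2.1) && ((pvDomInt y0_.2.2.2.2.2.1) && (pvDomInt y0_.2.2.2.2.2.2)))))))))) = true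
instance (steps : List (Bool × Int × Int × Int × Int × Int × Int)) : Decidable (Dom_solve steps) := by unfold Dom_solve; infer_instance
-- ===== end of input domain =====

-- B replaces A's iteratively grown list of signed intersection cuboids by a direct recursion:
-- for each 'on' step, the signed volume of its cuboid not covered by any later step
-- (objective: alternative decomposition, no signed-cuboid list is materialised).

abbrev PvStep := Bool × Int × Int × Int × Int × Int × Int

-- ===== PORT A =====
-- body of A's outer loop over steps ('bonus' list, extend, append when on)
def pvStepA (prev : List PvStep) (step : PvStep) : List PvStep :=
  match step with
  | (on, x1, x2, y1, y2, z1, z2) =>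
    let bonus := prev.foldl (fun bonus o =>
      if x1 ≤ o.2.2.1 ∧ x2 ≥ o.2.1 ∧ y1 ≤ o.2.2.2.2.1 ∧ y2 ≥ o.2.2.2.1 ∧ z1 ≤ o.2.2.2.2.2.2 ∧ z2 ≥ o.2.2.2.2.2.1 then
        bonus ++ [(!o.1, max x1 o.2.1, min x2 o.2.2.1, max y1 o.2.2.2.1, min y2 o.2.2.2.2.1, max z1 o.2.2.2.2.2.1, min z2 o.2.2.2.2.2.2)]
      else bonus) []
    let prev := prev ++ bonus
    if on then prev ++ [step] else prev

def solve (steps : List (Bool × Int × Int × Int × Int × Int × Int)) : Int :=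
  let prev := steps.foldl pvStepA []
  prev.foldl (fun tot c =>
    tot + (if c.1 then (1 : Int) else -1) * (c.2.2.1 - c.2.1 + 1) * (c.2.2.2.2.1 - c.2.2.2.1 + 1) * (c.2.2.2.2.2.2 - c.2.2.2.2.2.1 + 1)) 0

-- ===== PORT B =====
-- Source B's 'uncovered(c, later)': signed volume of cuboid c minus its parts covered by 'later'
def pvUnc (c : Int × Int × Int × Int × Int × Int) : List PvStep → Int
  | [] => (c.2.1 - c.1 + 1) * (c.2.2.2.1 - c.2.2.1 + 1) * (c.2.2.2.2.2 - c.2.2.2.2.1 + 1)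
  | o :: rest =>
    let total := pvUnc c rest
    if c.1 ≤ o.2.2.1 ∧ c.2.1 ≥ o.2.1 ∧ c.2.2.1 ≤ o.2.2.2.2.1 ∧ c.2.2.2.1 ≥ o.2.2.2.1 ∧ c.2.2.2.2.1 ≤ o.2.2.2.2.2.2 ∧ c.2.2.2.2.2 ≥ o.2.2.2.2.2.1 then
      total - pvUnc (max c.1 o.2.1, min c.2.1 o.2.2.1, max c.2.2.1 o.2.2.2.1,
                     min c.2.2.2.1 o.2.2.2.2.1, max c.2.2.2.2.1 o.2.2.2.2.2.1, min c.2.2.2.2.2 o.2.2.2.2.2.2) rest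
    else total

-- Source B's main loop: sum uncovered(cuboid, steps[i+1:]) over the 'on' steps
def pvSumOn : List PvStep → Int
  | [] => 0
  | s :: rest => (if s.1 then pvUnc s.2 rest else 0) + pvSumOn rest

def solve_alt (steps : List (Bool × Int × Int × Int × Int × Int × Int)) : Int :=
  pvSumOn steps

-- ===== PRECONDITION & SPEC =====
def Spec_solve (steps : List (Bool × Int × Int × Int × Int × Int × Int)) (out : Int) : Prop := out = solve_alt steps
instance (steps : List (Bool × Int × Int × Int × Int × Int × Int)) (out : Int) : Decidable (Spec_solve steps out) := by unfold Spec_solve; infer_instance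

-- ===== CLAIM (what is proved, stated in full; the proofs are below) =====
def Claim_equal_solve : Prop := ∀ (steps : List (Bool × Int × Int × Int × Int × Int × Int)), Dom_solve steps → Spec_solve steps (solve steps)

-- ===== LEMMAS AND PROOFS =====

def pvSign (b : Bool) : Int := if b then 1 else -1
def pvVolC (c : Int × Int × Int × Int × Int × Int) : Int :=
  (c.2.1 - c.1 + 1) * (c.2.2.2.1 - c.2.2.1 + 1) * (c.2.2.2.2.2 - c.2.2.2.2.1 + 1)
def pvTotal (prev : List PvStep) : Int :=
  (prev.map fun q => pvSign q.1 * pvVolC q.2).sum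

-- the 'bonus' foldl as filter+map (Prop-if aligned with the Bool form of foldl_append_if)
theorem pvFoldIf_eq_filterMap (prev : List PvStep) (x1 x2 y1 y2 z1 z2 : Int) :
    prev.foldl (fun bonus o =>
      if x1 ≤ o.2.2.1 ∧ x2 ≥ o.2.1 ∧ y1 ≤ o.2.2.2.2.1 ∧ y2 ≥ o.2.2.2.1 ∧ z1 ≤ o.2.2.2.2.2.2 ∧ z2 ≥ o.2.2.2.2.2.1 then
        bonus ++ [(!o.1, max x1 o.2.1, min x2 o.2.2.1, max y1 o.2.2.2.1, min y2 o.2.2.2.2.1, max z1 o.2.2.2.2.2.1, min z2 o.2.2.2.2.2.2)]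
      else bonus) [] =
    ((prev.filter fun o => decide (x1 ≤ o.2.2.1 ∧ x2 ≥ o.2.1 ∧ y1 ≤ o.2.2.2.2.1 ∧ y2 ≥ o.2.2.2.1 ∧ z1 ≤ o.2.2.2.2.2.2 ∧ z2 ≥ o.2.2.2.2.2.1)).map
      fun o => ((!o.1, max x1 o.2.1, min x2 o.2.2.1, max y1 o.2.2.2.1, min y2 o.2.2.2.2.1, max z1 o.2.2.2.2.2.1, min z2 o.2.2.2.2.2.2) : PvStep)) := by
  have hfun : (fun (bonus : List PvStep) (o : PvStep) =>
      if x1 ≤ o.2.2.1 ∧ x2 ≥ o.2.1 ∧ y1 ≤ o.2.2.2.2.1 ∧ y2 ≥ o.2.2.2.1 ∧ z1 ≤ o.2.2.2.2.2.2 ∧ z2 ≥ o.2.2.2.2.2.1 then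
        bonus ++ [((!o.1, max x1 o.2.1, min x2 o.2.2.1, max y1 o.2.2.2.1, min y2 o.2.2.2.2.1, max z1 o.2.2.2.2.2.1, min z2 o.2.2.2.2.2.2) : PvStep)]
      else bonus) =
      (fun bonus o =>
      if (fun (o : PvStep) => decide (x1 ≤ o.2.2.1 ∧ x2 ≥ o.2.1 ∧ y1 ≤ o.2.2.2.2.1 ∧ y2 ≥ o.2.2.2.1 ∧ z1 ≤ o.2.2.2.2.2.2 ∧ z2 ≥ o.2.2.2.2.2.1)) o then
        bonus ++ [((fun (o : PvStep) => ((!o.1, max x1 o.2.1, min x2 o.2.2.1, max y1 o.2.2.2.1, min y2 o.2.2.2.2.1, max z1 o.2.2.2.2.2.1, min z2 o.2.2.2.2.2.2) : PvStep)) o)]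
      else bonus) := by
    funext bonus o
    by_cases h : x1 ≤ o.2.2.1 ∧ x2 ≥ o.2.1 ∧ y1 ≤ o.2.2.2.2.1 ∧ y2 ≥ o.2.2.2.1 ∧ z1 ≤ o.2.2.2.2.2.2 ∧ z2 ≥ o.2.2.2.2.2.1
    · simp [h]
    · simp [h]
  rw [hfun, PySem.List.foldl_append_if]
  simp

-- sum over a filtered-then-mapped list as an if-sum over the whole list
theorem pvSum_filter_map (l : List PvStep) (p : PvStep → Bool) (f : PvStep → Int) :
    ((l.filter p).map f).sum = (l.map fun x => if p x then f x else 0).sum := by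
  induction l with
  | nil => rfl
  | cons h t ih =>
    by_cases hp : p h
    · simp [hp, ih]
    · simp [hp, ih]

-- unfolding pvUnc over one later step
theorem pvUnc_cons (c : Int × Int × Int × Int × Int × Int) (o : PvStep) (rest : List PvStep) :
    pvUnc c (o :: rest) =
      pvUnc c rest -
        (if c.1 ≤ o.2.2.1 ∧ c.2.1 ≥ o.2.1 ∧ c.2.2.1 ≤ o.2.2.2.2.1 ∧ c.2.2.2.1 ≥ o.2.2.2.1 ∧ c.2.2.2.2.1 ≤ o.2.2.2.2.2.2 ∧ c.2.2.2.2.2 ≥ o.2.2.2.2.2.1 then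
          pvUnc (max c.1 o.2.1, min c.2.1 o.2.2.1, max c.2.2.1 o.2.2.2.1,
                 min c.2.2.2.1 o.2.2.2.2.1, max c.2.2.2.2.1 o.2.2.2.2.2.1, min c.2.2.2.2.2 o.2.2.2.2.2.2) rest
        else 0) := by
  simp only [pvUnc]
  split
  · rfl
  · simp

-- the invariant: the signed-volume total of A's cuboid list, were the remaining steps L applied
-- to the current list prev, equals each current cuboid's 'uncovered' volume against L plus B's
-- sum over the 'on' steps of L
theorem pvMain (L : List PvStep) : ∀ (prev : List PvStep),
    pvTotal (L.foldl pvStepA prev) =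
      (prev.map fun q => pvSign q.1 * pvUnc q.2 L).sum + pvSumOn L := by
  induction L with
  | nil =>
    intro prev
    simp only [List.foldl_nil, pvSumOn, add_zero]
    rfl
  | cons s T ih =>
    intro prev
    rw [List.foldl_cons, ih (pvStepA prev s)]
    obtain ⟨on, sx1, sx2, sy1, sy2, sz1, sz2⟩ := s
    simp only [pvStepA, pvFoldIf_eq_filterMap]
    have hbonus :
        ((((prev.filter fun o => decide (sx1 ≤ o.2.2.1 ∧ sx2 ≥ o.2.1 ∧ sy1 ≤ o.2.2.2.2.1 ∧ sy2 ≥ o.2.2.2.1 ∧ sz1 ≤ o.2.2.2.2.2.2 ∧ sz2 ≥ o.2.2.2.2.2.1)).map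
          fun o => ((!o.1, max sx1 o.2.1, min sx2 o.2.2.1, max sy1 o.2.2.2.1, min sy2 o.2.2.2.2.1, max sz1 o.2.2.2.2.2.1, min sz2 o.2.2.2.2.2.2) : PvStep)).map
            fun q => pvSign q.1 * pvUnc q.2 T).sum) =
        (prev.map fun q => -(pvSign q.1 *
          (if q.2.1 ≤ sx2 ∧ q.2.2.1 ≥ sx1 ∧ q.2.2.2.1 ≤ sy2 ∧ q.2.2.2.2.1 ≥ sy1 ∧ q.2.2.2.2.2.1 ≤ sz2 ∧ q.2.2.2.2.2.2 ≥ sz1 then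
            pvUnc (max q.2.1 sx1, min q.2.2.1 sx2, max q.2.2.2.1 sy1,
                   min q.2.2.2.2.1 sy2, max q.2.2.2.2.2.1 sz1, min q.2.2.2.2.2.2 sz2) T
          else 0))).sum := by
      rw [List.map_map, pvSum_filter_map]
      refine congrArg List.sum (List.map_congr_left fun q _ => ?_)
      by_cases hov : sx1 ≤ q.2.2.1 ∧ sx2 ≥ q.2.1 ∧ sy1 ≤ q.2.2.2.2.1 ∧ sy2 ≥ q.2.2.2.1 ∧ sz1 ≤ q.2.2.2.2.2.2 ∧ sz2 ≥ q.2.2.2.2.2.1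
      · have hov' : q.2.1 ≤ sx2 ∧ q.2.2.1 ≥ sx1 ∧ q.2.2.2.1 ≤ sy2 ∧ q.2.2.2.2.1 ≥ sy1 ∧ q.2.2.2.2.2.1 ≤ sz2 ∧ q.2.2.2.2.2.2 ≥ sz1 := by
          obtain ⟨h1, h2, h3, h4, h5, h6⟩ := hov
          exact ⟨h2, h1, h4, h3, h6, h5⟩
        rw [if_pos (by exact_mod_cast decide_eq_true_iff.mpr hov), if_pos hov']
        simp only [Function.comp]
        have hint : ((max sx1 q.2.1, min sx2 q.2.2.1, max sy1 q.2.2.2.1, min sy2 q.2.2.2.2.1, max sz1 q.2.2.2.2.2.1, min sz2 q.2.2.2.2.2.2) : Int × Int × Int × Int × Int × Int) =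
            (max q.2.1 sx1, min q.2.2.1 sx2, max q.2.2.2.1 sy1, min q.2.2.2.2.1 sy2, max q.2.2.2.2.2.1 sz1, min q.2.2.2.2.2.2 sz2) := by
          simp [max_comm, min_comm]
        cases hq : q.1 <;> simp [pvSign, hint]
      · have hov' : ¬ (q.2.1 ≤ sx2 ∧ q.2.2.1 ≥ sx1 ∧ q.2.2.2.1 ≤ sy2 ∧ q.2.2.2.2.1 ≥ sy1 ∧ q.2.2.2.2.2.1 ≤ sz2 ∧ q.2.2.2.2.2.2 ≥ sz1) := by
          intro ⟨h1, h2, h3, h4, h5, h6⟩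
          exact hov ⟨h2, h1, h4, h3, h6, h5⟩
        rw [if_neg (by simpa using hov), if_neg hov']
        simp
    have hprevT :
        (prev.map fun q => pvSign q.1 * pvUnc q.2 ((on, sx1, sx2, sy1, sy2, sz1, sz2) :: T)).sum =
        (prev.map fun q => pvSign q.1 * pvUnc q.2 T).sum +
        (prev.map fun q => -(pvSign q.1 *
          (if q.2.1 ≤ sx2 ∧ q.2.2.1 ≥ sx1 ∧ q.2.2.2.1 ≤ sy2 ∧ q.2.2.2.2.1 ≥ sy1 ∧ q.2.2.2.2.2.1 ≤ sz2 ∧ q.2.2.2.2.2.2 ≥ sz1 then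
            pvUnc (max q.2.1 sx1, min q.2.2.1 sx2, max q.2.2.2.1 sy1,
                   min q.2.2.2.2.1 sy2, max q.2.2.2.2.2.1 sz1, min q.2.2.2.2.2.2 sz2) T
          else 0))).sum := by
      rw [← List.sum_map_add]
      refine congrArg List.sum (List.map_congr_left fun q _ => ?_)
      rw [pvUnc_cons]
      ring
    have hsum : pvSumOn ((on, sx1, sx2, sy1, sy2, sz1, sz2) :: T) =
        (if on then pvUnc (sx1, sx2, sy1, sy2, sz1, sz2) T else 0) + pvSumOn T := rfl
    cases on with
    | true =>
      rw [if_pos rfl]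
      rw [List.map_append, List.sum_append, List.map_append, List.sum_append, hbonus, hprevT, hsum]
      simp only [List.map_cons, List.map_nil, List.sum_cons, List.sum_nil, pvSign, if_true]
      ring
    | false =>
      rw [if_neg (by simp)]
      rw [List.map_append, List.sum_append, hbonus, hprevT, hsum]
      simp only [if_false, Bool.false_eq_true]
      ring

-- A's final summation loop is the signed-volume total of its cuboid list
theorem pvSolveA_total (steps : List PvStep) :
    solve steps = pvTotal (steps.foldl pvStepA []) := by
  show ((steps.foldl pvStepA []).foldl (fun tot c =>
      tot + (if c.1 then (1 : Int) else -1) * (c.2.2.1 - c.2.1 + 1) * (c.2.2.2.2.1 - c.2.2.2.1 + 1) * (c.2.2.2.2.2.2 - c.2.2.2.2.2.1 + 1)) 0) = _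
  rw [PySem.List.foldl_add (steps.foldl pvStepA []) (fun c : PvStep =>
    (if c.1 = true then (1 : Int) else -1) * (c.2.2.1 - c.2.1 + 1) * (c.2.2.2.2.1 - c.2.2.2.1 + 1) * (c.2.2.2.2.2.2 - c.2.2.2.2.2.1 + 1)) 0]
  rw [zero_add]
  refine congrArg List.sum (List.map_congr_left fun c _ => ?_)
  simp only [pvSign, pvVolC]
  ring

-- ===== VERDICT (by name: the statement is the Claim_ definition above) =====
theorem solve_spec : Claim_equal_solve := by
  intro steps _
  unfold Spec_solve solve_alt
  rw [pvSolveA_total, pvMain steps []]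
  simp
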